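-- pv_equiv track=rewrite | github.com/PaulMoritz/Secret-Sharing-in-Comparison | reset_tools.py | level_structure_to_id
-- ===== SOURCE A (Python) =====
-- def level_structure_to_id(shares):
--     people_per_level = []
--     thresholds = [0]
--     list_of_new_shareholders = []
--     for level in shares:
--         people_per_level.append(level[0])
--         thresholds.append(level[1])
--     for level_index in range(len(people_per_level)):
--         for person_number in range(people_per_level[level_index]):
--             list_of_new_shareholders.append("s_{}_{}".format(person_number + 1, thresholds[level_index]))
--     degree_of_function = thresholds[-1] - 1
--     return list_of_new_shareholders, degree_of_function
-- ===== SOURCE B (Python) =====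
-- def level_structure_to_id(shares):
--     def rec(i, prev):
--         if i == len(shares):
--             return [], prev - 1
--         rest, degree = rec(i + 1, shares[i][1])
--         block = ["s_%d_%d" % (p, prev) for p in range(1, shares[i][0] + 1)]
--         return block + rest, degree
--     return rec(0, 0)
-- ===== Notes on version B (the rewrite author's own statement) =====
-- stated objective: alternative
-- what changed: Recursive decomposition that builds the id list back-to-front: each call prepends its level's block (tagged with the threshold passed in) to the recursive result and the degree is produced at the base case from the last threshold, instead of A's staged construction of people_per_level/thresholds lists followed by an index-based double loop.
import Mathlib
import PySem

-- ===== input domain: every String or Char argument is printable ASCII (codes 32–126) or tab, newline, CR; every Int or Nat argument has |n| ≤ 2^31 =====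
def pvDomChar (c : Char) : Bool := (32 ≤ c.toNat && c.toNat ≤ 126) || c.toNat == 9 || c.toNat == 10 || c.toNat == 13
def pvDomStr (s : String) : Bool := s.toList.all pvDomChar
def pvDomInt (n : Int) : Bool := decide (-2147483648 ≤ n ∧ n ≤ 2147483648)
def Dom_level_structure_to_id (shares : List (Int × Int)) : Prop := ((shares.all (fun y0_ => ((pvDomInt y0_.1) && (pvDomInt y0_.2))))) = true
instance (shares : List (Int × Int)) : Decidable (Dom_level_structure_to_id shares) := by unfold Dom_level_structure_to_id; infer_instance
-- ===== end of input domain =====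

-- B is a recursive back-to-front construction: each call prepends its level's id block and the
-- degree comes from the base case, instead of A's staged lists plus an index-based double loop.

-- "s_{}_{}".format(p, t) / "s_%d_%d" % (p, t)  (identical string produced by both Pythons)
def pvFmt (p t : Int) : String := "s_" ++ PySem.Int.toStr p ++ "_" ++ PySem.Int.toStr t

-- ===== PORT A =====
def level_structure_to_id (shares : List (Int × Int)) : List String × Int :=
  let people_per_level : List Int := shares.foldl (fun acc level => acc ++ [level.1]) []
  let thresholds : List Int := shares.foldl (fun acc level => acc ++ [level.2]) [0]
  let list_of_new_shareholders : List String :=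
    (PySem.List.pyRange 0 (people_per_level.length : Int) 1).foldl (fun acc level_index =>
      (PySem.List.pyRange 0 (PySem.List.pyGetD people_per_level level_index 0) 1).foldl
        (fun acc2 person_number =>
          acc2 ++ [pvFmt (person_number + 1) (PySem.List.pyGetD thresholds level_index 0)]) acc) []
  let degree_of_function : Int := PySem.List.pyGetD thresholds (-1) 0 - 1
  (list_of_new_shareholders, degree_of_function)

-- ===== PORT B =====
-- rec(i, prev): recursion over the tail of shares (structural recursion replaces the index i)
def pvRec : List (Int × Int) → Int → List String × Int
  | [], prev => ([], prev - 1)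
  | level :: rest, prev =>
    let r := pvRec rest level.2
    ((PySem.List.pyRange 1 (level.1 + 1) 1).map (fun p => pvFmt p prev) ++ r.1, r.2)

def level_structure_to_id_alt (shares : List (Int × Int)) : List String × Int :=
  pvRec shares 0

-- ===== PRECONDITION & SPEC =====
def Spec_level_structure_to_id (shares : List (Int × Int)) (out : List String × Int) : Prop := out = level_structure_to_id_alt shares
instance (shares : List (Int × Int)) (out : List String × Int) : Decidable (Spec_level_structure_to_id shares out) := by unfold Spec_level_structure_to_id; infer_instance

-- ===== CLAIM =====
def Claim_equal_level_structure_to_id : Prop := ∀ (shares : List (Int × Int)), Dom_level_structure_to_id shares → Spec_level_structure_to_id shares (level_structure_to_id shares)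

-- ===== LEMMAS AND PROOFS =====

-- one level's block of ids as A produces it, tagged with threshold t
def pvBlock (n t : Int) : List String :=
  List.map (fun person_number => pvFmt (person_number + 1) t) (PySem.List.pyRange 0 n 1)

-- common characterisation: ids and the threshold left after the traversal
def pvGo : List (Int × Int) → Int → List String × Int
  | [], prev => ([], prev)
  | l :: rest, prev =>
    let r := pvGo rest l.2
    (pvBlock l.1 prev ++ r.1, r.2)

theorem pvGo_snd (l : List (Int × Int)) (prev : Int) :
    (pvGo l prev).2 = ((prev :: l.map Prod.snd).getLast (by simp)) := by
  induction l generalizing prev with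
  | nil => simp [pvGo]
  | cons h t ih => simp [pvGo, ih h.2, List.getLast_cons]

theorem pvBlock_eq_range_one (n t : Int) :
    (PySem.List.pyRange 1 (n + 1) 1).map (fun p => pvFmt p t) = pvBlock n t := by
  simp [pvBlock, PySem.List.pyRange_one, List.map_map, Function.comp]
  intro a _
  rw [Int.add_comm]

theorem pvRec_eq_go (l : List (Int × Int)) (prev : Int) :
    pvRec l prev = ((pvGo l prev).1, (pvGo l prev).2 - 1) := by
  induction l generalizing prev with
  | nil => simp [pvRec, pvGo]
  | cons h t ih => simp [pvRec, pvGo, ih h.2, pvBlock_eq_range_one]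

theorem idx_foldl (l : List (Int × Int)) (prev : Int) (acc : List String) :
    (List.range (l.map Prod.fst).length).foldl
      (fun a i => a ++ List.map (fun x => pvFmt (x + 1) ((prev :: l.map Prod.snd).getD i 0))
          (PySem.List.pyRange 0 ((l.map Prod.fst).getD i 0) 1)) acc
    = acc ++ (pvGo l prev).1 := by
  induction l generalizing prev acc with
  | nil => simp [pvGo]
  | cons h t ih =>
    simp only [List.map_cons, List.length_cons, List.range_succ_eq_map, List.foldl_cons,
      List.foldl_map, List.getD_cons_succ, List.getD_cons_zero]
    rw [ih h.2]
    simp [pvGo, pvBlock, List.append_assoc]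

theorem level_structure_to_id_eq_go (shares : List (Int × Int)) :
    level_structure_to_id shares = ((pvGo shares 0).1, (pvGo shares 0).2 - 1) := by
  unfold level_structure_to_id
  simp only [PySem.List.foldl_append_singleton_eq_map, List.nil_append, List.singleton_append,
    PySem.List.pyRange_zero_nat, List.foldl_map, PySem.List.pyGetD_natCast]
  rw [idx_foldl shares 0 [], PySem.List.pyGetD_neg_one ((0:Int) :: shares.map Prod.snd) 0 (by simp)]
  simp [pvGo_snd]

-- ===== VERDICT =====
theorem level_structure_to_id_spec : Claim_equal_level_structure_to_id := by
  intro shares _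
  unfold Spec_level_structure_to_id level_structure_to_id_alt
  rw [pvRec_eq_go, level_structure_to_id_eq_go]
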